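-- pv_equiv track=rewrite | github.com/InfuseAI/piperider | piperider_cli/compare_report.py | _merge_keys
-- ===== SOURCE A (Python) =====
-- from typing import Dict, List, Optional
--
-- def _merge_keys(base: List[str], target: List[str]):
--     '''
--     Merge keys from base, target tables. Unlike default union, it preserves the order for column rename, added, removed.
--
--     :param base: keys for base table
--     :param target: keys for base table
--     :return: merged keys
--     '''
--
--     result = []
--     while base and target:
--         if base[0] == target[0]:
--             result.append(base[0])
--             base.pop(0)
--             target.pop(0)
--         elif base[0] in target:
--             idx = target.index(base[0])
--             for i in target[0:idx]:
--                 if i not in result: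
--                     result.append(i)
--             result.append(base[0])
--             base.pop(0)
--             target = target[idx + 1:]
--         else:
--             result.append(base[0])
--             base.pop(0)
--
--     for c in base:
--         if c not in result:
--             result.append(c)
--
--     for c in target:
--         if c not in result:
--             result.append(c)
--
--     return result
-- ===== SOURCE B (Python) =====
-- def _merge_keys(base, target):
--     # Return-value equivalent re-implementation: index map + pointer into target,
--     # a seen-set for membership; no pop(0)/slicing of the inputs (B does not mutate its arguments; A empties `base` in place).
--     pos = {}
--     for i, v in enumerate(target):
--         pos.setdefault(v, []).append(i)
--     result = []
--     seen = set()
--     bi, tj = 0, 0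
--     n, m = len(base), len(target)
--     while bi < n and tj < m:
--         b0 = base[bi]
--         bi += 1
--         if target[tj] == b0:
--             result.append(b0)
--             seen.add(b0)
--             tj += 1
--             continue
--         idx = next((k for k in pos.get(b0, ()) if k >= tj), None)
--         if idx is None:
--             result.append(b0)
--             seen.add(b0)
--         else:
--             for v in target[tj:idx]:
--                 if v not in seen:
--                     result.append(v)
--                     seen.add(v)
--             result.append(b0)
--             seen.add(b0)
--             tj = idx + 1
--     for c in base[bi:]:
--         if c not in seen:
--             result.append(c)
--             seen.add(c)
--     for c in target[tj:]:
--         if c not in seen: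
--             result.append(c)
--             seen.add(c)
--     return result
-- ===== Notes on version B (the rewrite author's own statement) =====
-- stated objective: faster
-- what changed: Replaces A's destructive pop(0)/in-scans/list.index/slicing on shrinking copies by a single precomputed index map (value -> ascending positions in target), a pointer tj into an unmodified target and a seen-set, so membership and 'next occurrence' queries no longer rescan the lists.
import Mathlib
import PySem

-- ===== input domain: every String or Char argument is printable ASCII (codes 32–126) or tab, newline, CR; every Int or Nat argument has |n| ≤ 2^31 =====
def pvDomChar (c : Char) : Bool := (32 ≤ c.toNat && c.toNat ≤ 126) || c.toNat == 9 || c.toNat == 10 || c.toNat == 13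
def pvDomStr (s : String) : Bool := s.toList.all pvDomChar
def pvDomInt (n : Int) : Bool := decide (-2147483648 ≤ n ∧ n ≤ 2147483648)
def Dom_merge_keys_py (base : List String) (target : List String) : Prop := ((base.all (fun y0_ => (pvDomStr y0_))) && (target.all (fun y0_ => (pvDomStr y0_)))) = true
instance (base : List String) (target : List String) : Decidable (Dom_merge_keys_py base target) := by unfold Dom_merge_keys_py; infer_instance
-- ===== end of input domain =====

-- B replaces A's quadratic pop(0)/slice/scan merge by an index map over `target`, a pointer `tj`
-- into `target` and a seen-set (return-value equivalence only: A empties `base` in place, B does not mutate).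


-- ===== PORT A =====
-- 'for c in cs: if c not in result: result.append(c)'
def pvAppendNew (result : List String) (cs : List String) : List String :=
  cs.foldl (fun r c => if c ∈ r then r else r ++ [c]) result

-- the while loop of A; state = (base, target, result); base.pop(0) happens on every iteration,
-- so the recursion consumes `base`; on exit the two trailing for-loops run over what is left.
def pvLoopA : List String → List String → List String → List String
  | [], target, result => pvAppendNew (pvAppendNew result []) target
  | b0 :: brest, [], result => pvAppendNew (pvAppendNew result (b0 :: brest)) []
  | b0 :: brest, t0 :: trest, result =>
    if b0 = t0 then
      pvLoopA brest trest (result ++ [b0])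
    else if b0 ∈ t0 :: trest then
      -- idx = target.index(base[0]); guarded by the membership test, so index? is some
      let idx := (PySem.List.index? (t0 :: trest) b0).getD 0
      pvLoopA brest (PySem.List.slice (t0 :: trest) (some ((idx : Int) + 1)) none)
        (pvAppendNew result (PySem.List.slice (t0 :: trest) (some 0) (some (idx : Int))) ++ [b0])
    else
      pvLoopA brest (t0 :: trest) (result ++ [b0])

def merge_keys_py (base : List String) (target : List String) : List String :=
  pvLoopA base target []

-- ===== PORT B =====
-- pos.setdefault(v, []).append(i): Dict.modify with default []; enumerate indices are ≥ 0, stored as Nat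
def pvBuildPos (target : List String) : PySem.Dict String (List Nat) :=
  (PySem.List.enumerate target).foldl
    (fun d p => d.modify p.2 [] (fun l => l ++ [p.1.toNat])) PySem.Dict.empty

-- 'for c in cs: if c not in seen: result.append(c); seen.add(c)'
def pvTail (rs : List String × PySem.Set String) (cs : List String) : List String × PySem.Set String :=
  cs.foldl (fun rs c => if PySem.Set.contains rs.2 c then rs else (rs.1 ++ [c], PySem.Set.add rs.2 c)) rs

-- the while loop of B; recursion consumes `base` (bi advances every iteration); tj is the pointer into target
def pvLoopB (target : List String) (pos : PySem.Dict String (List Nat)) :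
    List String → Nat → List String → PySem.Set String → List String
  | [], tj, result, seen =>
      (pvTail (pvTail (result, seen) []) (PySem.List.slice target (some (tj : Int)) none)).1
  | b0 :: brest, tj, result, seen =>
    if tj < target.length then
      if target.getD tj "" = b0 then
        pvLoopB target pos brest (tj + 1) (result ++ [b0]) (PySem.Set.add seen b0)
      else
        -- idx = next((k for k in pos.get(b0, ()) if k >= tj), None)
        match (pos.getD b0 []).find? (fun k => decide (tj ≤ k)) with
        | none => pvLoopB target pos brest tj (result ++ [b0]) (PySem.Set.add seen b0)
        | some idx =>
          let rs := pvTail (result, seen) (PySem.List.slice target (some (tj : Int)) (some (idx : Int)))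
          pvLoopB target pos brest (idx + 1) (rs.1 ++ [b0]) (PySem.Set.add rs.2 b0)
    else
      (pvTail (pvTail (result, seen) (b0 :: brest)) (PySem.List.slice target (some (tj : Int)) none)).1

def merge_keys_py_alt (base : List String) (target : List String) : List String :=
  pvLoopB target (pvBuildPos target) base 0 [] PySem.Set.empty

-- ===== PRECONDITION & SPEC =====
def Spec_merge_keys_py (base : List String) (target : List String) (out : List String) : Prop := out = merge_keys_py_alt base target
instance (base : List String) (target : List String) (out : List String) : Decidable (Spec_merge_keys_py base target out) := by unfold Spec_merge_keys_py; infer_instance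

-- ===== CLAIM (what is proved, stated in full; the proofs are below) =====
def Claim_equal_merge_keys_py : Prop := ∀ (base : List String) (target : List String), Dom_merge_keys_py base target → Spec_merge_keys_py base target (merge_keys_py base target)

-- ===== LEMMAS AND PROOFS =====

-- ascending list of the positions of v in t, starting at offset s (characterises pvBuildPos)
def pvIdxList (v : String) : List String → Nat → List Nat
  | [], _ => []
  | x :: xs, s => if x = v then s :: pvIdxList v xs (s + 1) else pvIdxList v xs (s + 1)

lemma pvBuildPos_go (v : String) :
    ∀ (t : List String) (s : Nat) (d : PySem.Dict String (List Nat)),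
      ((PySem.List.enumerate t (s : Int)).foldl
        (fun d p => d.modify p.2 [] (fun l => l ++ [p.1.toNat])) d).getD v []
      = d.getD v [] ++ pvIdxList v t s := by
  intro t
  induction t with
  | nil => intro s d; simp [PySem.List.enumerate_nil, pvIdxList]
  | cons x xs ih =>
    intro s d
    rw [PySem.List.enumerate_cons]
    simp only [List.foldl_cons]
    have hs : ((s : Int) + 1) = ((s + 1 : Nat) : Int) := by push_cast; ring
    rw [hs, ih (s + 1)]
    by_cases hx : x = v
    · subst hx
      rw [PySem.Dict.getD_modify_self]
      simp [pvIdxList]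
    · rw [PySem.Dict.getD_modify, if_neg (fun h => hx h.symm)]
      simp [pvIdxList, hx]

lemma pvBuildPos_getD (target : List String) (v : String) :
    (pvBuildPos target).getD v [] = pvIdxList v target 0 := by
  have := pvBuildPos_go v target 0 PySem.Dict.empty
  simpa [pvBuildPos] using this

-- find? over pvIdxList with threshold ≤ every listed position = plain first occurrence
lemma pvFind_all_ge (v : String) :
    ∀ (t : List String) (s tj : Nat), tj ≤ s →
      (pvIdxList v t s).find? (fun k => decide (tj ≤ k))
        = (PySem.List.index? t v).map (· + s) := by
  intro t
  induction t with
  | nil => intro s tj _; simp [pvIdxList, PySem.List.index?_eq_idxOf?]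
  | cons x xs ih =>
    intro s tj hts
    by_cases hx : x = v
    · subst hx
      rw [PySem.List.index?_cons_self]
      have e : pvIdxList x (x :: xs) s = s :: pvIdxList x xs (s + 1) := by simp [pvIdxList]
      rw [e, List.find?_cons_of_pos (by simpa using hts)]
      simp
    · have h1 : PySem.List.index? (x :: xs) v = (PySem.List.index? xs v).map (· + 1) :=
        PySem.List.index?_cons_of_ne _ hx
      simp only [pvIdxList, if_neg hx, h1]
      rw [ih (s + 1) tj (by omega)]
      cases PySem.List.index? xs v <;> simp <;> omega

-- the key lemma: B's index-map query equals A's index? on the remaining target suffix, shifted by tj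
lemma pvFind_eq_index? (v : String) :
    ∀ (t : List String) (s tj : Nat), s ≤ tj →
      (pvIdxList v t s).find? (fun k => decide (tj ≤ k))
        = (PySem.List.index? (t.drop (tj - s)) v).map (· + tj) := by
  intro t
  induction t with
  | nil => intro s tj _; simp [pvIdxList, PySem.List.index?_eq_idxOf?]
  | cons x xs ih =>
    intro s tj hst
    rcases Nat.eq_or_lt_of_le hst with heq | hlt
    · subst heq
      rw [Nat.sub_self, List.drop_zero]
      by_cases hx : x = v
      · subst hx
        rw [PySem.List.index?_cons_self]
        have e : pvIdxList x (x :: xs) s = s :: pvIdxList x xs (s + 1) := by simp [pvIdxList]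
        rw [e, List.find?_cons_of_pos (by simp)]
        simp
      · have h1 : PySem.List.index? (x :: xs) v = (PySem.List.index? xs v).map (· + 1) :=
          PySem.List.index?_cons_of_ne _ hx
        simp only [pvIdxList, if_neg hx, h1]
        rw [pvFind_all_ge v xs (s + 1) s (by omega)]
        cases PySem.List.index? xs v <;> simp <;> omega
    · have hdrop : (x :: xs).drop (tj - s) = xs.drop (tj - (s + 1)) := by
        have : tj - s = (tj - (s + 1)) + 1 := by omega
        rw [this]; rfl
      by_cases hx : x = v
      · subst hx
        have e : pvIdxList x (x :: xs) s = s :: pvIdxList x xs (s + 1) := by simp [pvIdxList]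
        rw [e, List.find?_cons_of_neg (by simp; omega)]
        rw [ih (s + 1) tj (by omega), hdrop]
      · simp only [pvIdxList, if_neg hx]
        rw [ih (s + 1) tj (by omega), hdrop]

-- invariant: the seen-set holds exactly the elements of result
def pvInv (result : List String) (seen : PySem.Set String) : Prop :=
  ∀ x, x ∈ seen ↔ x ∈ result

lemma pvTail_spec :
    ∀ (cs result : List String) (seen : PySem.Set String), pvInv result seen →
      (pvTail (result, seen) cs).1 = pvAppendNew result cs
        ∧ pvInv (pvTail (result, seen) cs).1 (pvTail (result, seen) cs).2 := by
  intro cs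
  induction cs with
  | nil => intro result seen h; exact ⟨rfl, h⟩
  | cons c cs ih =>
    intro result seen h
    have hseen : (c ∈ seen) = (c ∈ result) := propext (h c)
    by_cases hcr : c ∈ result
    · simpa [pvTail, pvAppendNew, List.foldl_cons, hseen, hcr] using ih result seen h
    · have hadd : pvInv (result ++ [c]) (PySem.Set.add seen c) := by
        intro x
        rw [PySem.Set.mem_add]
        simp [h x, or_comm]
      simpa [pvTail, pvAppendNew, List.foldl_cons, hseen, hcr] using ih (result ++ [c]) _ hadd
lemma pvInv_add (result : List String) (seen : PySem.Set String) (b : String)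
    (h : pvInv result seen) : pvInv (result ++ [b]) (PySem.Set.add seen b) := by
  intro x
  rw [PySem.Set.mem_add]
  simp [h x, or_comm]

lemma pvLoop_eq (target : List String) :
    ∀ (base : List String) (tj : Nat) (result : List String) (seen : PySem.Set String),
      pvInv result seen →
      pvLoopB target (pvBuildPos target) base tj result seen
        = pvLoopA base (target.drop tj) result := by
  intro base
  induction base with
  | nil =>
    intro tj result seen h
    have hs : PySem.List.slice target (some (tj : Int)) none = target.drop tj :=
      PySem.List.slice_from_natCast _ _
    simp only [pvLoopB, pvLoopA, hs]
    have : pvTail (result, seen) [] = (result, seen) := rfl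
    rw [this]
    have h1 : pvAppendNew result [] = result := rfl
    rw [h1]
    exact (pvTail_spec (target.drop tj) result seen h).1
  | cons b0 brest ih =>
    intro tj result seen h
    by_cases htj : tj < target.length
    · have hrem : target.drop tj = target[tj] :: target.drop (tj + 1) :=
        List.drop_eq_getElem_cons htj
      have hgetD : target.getD tj "" = target[tj] := List.getD_eq_getElem _ _ htj
      rw [hrem]
      by_cases hb : b0 = target[tj]
      · simp only [pvLoopB, if_pos htj, hgetD, if_pos hb.symm, pvLoopA, if_pos hb]
        rw [ih (tj + 1) (result ++ [b0]) _ (pvInv_add _ _ _ h)]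
      · have hfind : ((pvBuildPos target).getD b0 []).find? (fun k => decide (tj ≤ k))
            = (PySem.List.index? (target.drop tj) b0).map (· + tj) := by
          rw [pvBuildPos_getD]
          have := pvFind_eq_index? b0 target 0 tj (by omega)
          simpa using this
        have hne : ¬ (target.getD tj "" = b0) := by rw [hgetD]; exact fun e => hb e.symm
        cases hidx : PySem.List.index? (target.drop tj) b0 with
        | none =>
          have hmem : b0 ∉ target[tj] :: target.drop (tj + 1) := by
            rw [← hrem]; exact (PySem.List.index?_eq_none_iff _ _).mp hidx
          simp only [pvLoopB, if_pos htj, if_neg hne, hfind, hidx, Option.map_none,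
            pvLoopA, if_neg hb, if_neg hmem]
          rw [ih tj (result ++ [b0]) _ (pvInv_add _ _ _ h), hrem]
        | some j =>
          have hmem : b0 ∈ target.drop tj :=
            (PySem.List.index?_isSome_iff _ _).mp (by rw [hidx]; rfl)
          simp only [pvLoopB, if_pos htj, if_neg hne, hfind, hidx, Option.map_some,
            pvLoopA, if_neg hb, ← hrem, Option.getD_some]
          -- slices on both sides reduce to take/drop of the suffix
          have hsl1 : PySem.List.slice target (some (tj : Int)) (some ((j + tj : Nat) : Int))
              = (target.drop tj).take j := by
            rw [PySem.List.slice_natCast]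
            congr 1
            omega
          have hsl2 : PySem.List.slice (target.drop tj) (some 0) (some (j : Int))
              = (target.drop tj).take j := by
            rw [PySem.List.slice_zero_start, PySem.List.slice_to_natCast]
          have hsl3 : PySem.List.slice (target.drop tj) (some ((j : Int) + 1)) none
              = target.drop (j + tj + 1) := by
            have : ((j : Int) + 1) = ((j + 1 : Nat) : Int) := by push_cast; ring
            rw [this, PySem.List.slice_from_natCast, List.drop_drop]
            congr 1
            omega
          rw [hsl1, hsl2, hsl3]
          obtain ⟨hfst, hinv⟩ := pvTail_spec ((target.drop tj).take j) result seen h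
          rw [ih (j + tj + 1) _ _ (pvInv_add _ _ _ hinv), hfst, if_pos hmem]
    · have hrem : target.drop tj = [] := List.drop_eq_nil_of_le (by omega)
      have hs : PySem.List.slice target (some (tj : Int)) none = target.drop tj :=
        PySem.List.slice_from_natCast _ _
      simp only [pvLoopB, if_neg htj, hrem, pvLoopA, hs]
      have h2 : ∀ rs : List String × PySem.Set String, pvTail rs [] = rs := fun _ => rfl
      rw [h2]
      have h3 : ∀ r : List String, pvAppendNew r [] = r := fun _ => rfl
      rw [h3]
      exact (pvTail_spec (b0 :: brest) result seen h).1

-- ===== VERDICT (by name: the statement is the Claim_ definition above) =====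
theorem merge_keys_py_spec : Claim_equal_merge_keys_py := by
  intro base target _
  unfold Spec_merge_keys_py merge_keys_py merge_keys_py_alt
  rw [pvLoop_eq target base 0 [] PySem.Set.empty (by intro x; simp [PySem.Set.empty])]
  rfl
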